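-- pv_equiv track=rewrite | github.com/leiyuan1989/ipmigration | ipmigration/cell/apr/pr/pattern_apr.py | generate_interval_dict
-- ===== SOURCE A (Python) =====
-- def generate_interval_dict(x_coordinate_dict):
--     """根据x_coordinate_dict生成区间到网络的映射"""
--     interval_dict = {}
--
--     # 收集所有存在点的x坐标
--     existing_x = list(range(max(x_coordinate_dict.keys())+1))
--     # 如果没有任何点，直接返回空的interval_dict
--     if not existing_x:
--         return interval_dict
--
--     # 为每个存在点的x值创建区间(x, x+1)
--     for x in existing_x:
--         interval = (x, x + 1)
--         interval_dict[interval] = []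
--
--     # 构建网络到其x坐标范围的映射
--     net_x_range = {}
--     # 遍历x_coordinate_dict中的每个x坐标
--     for x, points in x_coordinate_dict.items():
--         # 遍历每个点的信息
--         for point_info in points:
--             net, point_list = point_info
--             if not point_list:
--                 continue
--             # 提取点的x坐标
--             point_x = point_list[0]
--             # 更新网络的x坐标范围
--             if net not in net_x_range:
--                 net_x_range[net] = (point_x, point_x)
--             else:
--                 current_min, current_max = net_x_range[net]
--                 net_x_range[net] = (min(current_min, point_x), max(current_max, point_x))
--
--     # 确定哪些网络属于每个区间
--     for interval, _ in interval_dict.items():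
--         x, x_plus_1 = interval
--         for net, (min_x, max_x) in net_x_range.items():
--             # 检查网络是否跨越区间(x, x+1)
--             if min_x <= x and max_x >= x_plus_1:
--                 interval_dict[interval].append(net)
--
--     return interval_dict
-- ===== SOURCE B (Python) =====
-- def generate_interval_dict(x_coordinate_dict):
--     """Net-major rewrite: each net is appended into the unit intervals it spans."""
--     max_x = max(x_coordinate_dict)
--     if max_x < 0:
--         return {}
--     net_range = {}
--     for points in x_coordinate_dict.values():
--         for net, point_list in points:
--             if point_list:
--                 p = point_list[0]
--                 lo, hi = net_range.get(net, (p, p))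
--                 net_range[net] = (min(lo, p), max(hi, p))
--     buckets = {x: [] for x in range(max_x + 1)}
--     for net, (lo, hi) in net_range.items():
--         for x in range(max(lo, 0), min(hi, max_x + 1)):
--             buckets[x].append(net)
--     return {(x, x + 1): nets for x, nets in buckets.items()}
-- ===== Notes on version B (the rewrite author's own statement) =====
-- stated objective: alternative
-- what changed: Instead of scanning every net for every unit interval (interval-major double loop), B iterates net-major: each net is appended once into the per-x buckets of the x-range it spans, and the buckets are assembled into the interval dict at the end.
import Mathlib
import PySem

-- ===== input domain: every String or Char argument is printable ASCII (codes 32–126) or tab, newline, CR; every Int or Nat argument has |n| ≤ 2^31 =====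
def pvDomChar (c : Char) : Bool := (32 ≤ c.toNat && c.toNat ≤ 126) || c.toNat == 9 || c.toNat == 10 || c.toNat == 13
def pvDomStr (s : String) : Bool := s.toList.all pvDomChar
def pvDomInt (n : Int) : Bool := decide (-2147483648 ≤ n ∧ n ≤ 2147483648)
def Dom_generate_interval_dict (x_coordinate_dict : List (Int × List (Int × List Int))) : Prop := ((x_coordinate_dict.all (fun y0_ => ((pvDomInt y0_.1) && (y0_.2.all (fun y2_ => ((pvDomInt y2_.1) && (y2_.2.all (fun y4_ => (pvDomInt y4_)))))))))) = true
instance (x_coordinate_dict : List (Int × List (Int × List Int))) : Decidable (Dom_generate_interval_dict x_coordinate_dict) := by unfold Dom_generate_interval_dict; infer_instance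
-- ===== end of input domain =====

-- B replaces A's interval-major double scan (every net tested for every interval) by a
-- net-major pass that appends each net into the unit intervals it spans (objective: alternative).

-- ===== PORT A =====
-- loop body of A's net_x_range construction ('if not point_list: continue; …')
def pvNetRangeStepA (r : PySem.Dict Int (Int × Int)) (pi : Int × List Int) : PySem.Dict Int (Int × Int) :=
  match pi.2 with
  | [] => r
  | point_x :: _ =>
    match r.get? pi.1 with
    | none => r.insert pi.1 (point_x, point_x)
    | some c => r.insert pi.1 (min c.1 point_x, max c.2 point_x)

def generate_interval_dict (x_coordinate_dict : List (Int × List (Int × List Int))) : List (Int × Int × List Int) :=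
  let d := PySem.Dict.ofList x_coordinate_dict
  match PySem.List.max? d.keys (fun k => k) with
  | none => []  -- Python raises ValueError here (max of empty dict); excluded by Pre_
  | some mx =>
    let existing_x := PySem.List.pyRange 0 (mx + 1) 1
    if existing_x = [] then []
    else
      let interval_dict := existing_x.foldl (fun dd x => dd.insert (x, x + 1) ([] : List Int)) PySem.Dict.empty
      let net_x_range := d.items.foldl (fun r kv => kv.2.foldl pvNetRangeStepA r) PySem.Dict.empty
      let final := interval_dict.items.foldl (fun dd kv =>
          net_x_range.items.foldl (fun dd nr =>
            if nr.2.1 ≤ kv.1.1 ∧ kv.1.2 ≤ nr.2.2 then dd.modify kv.1 [] (· ++ [nr.1]) else dd) dd)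
        interval_dict
      final.items.map (fun p => (p.1.1, p.1.2, p.2))

-- ===== PORT B =====
-- loop body of B's net_range construction ('lo, hi = net_range.get(net, (p, p)); …')
def pvNetRangeStepB (r : PySem.Dict Int (Int × Int)) (pi : Int × List Int) : PySem.Dict Int (Int × Int) :=
  match pi.2 with
  | [] => r
  | p :: _ =>
    let c := r.getD pi.1 (p, p)
    r.insert pi.1 (min c.1 p, max c.2 p)

def generate_interval_dict_alt (x_coordinate_dict : List (Int × List (Int × List Int))) : List (Int × Int × List Int) :=
  let d := PySem.Dict.ofList x_coordinate_dict
  match PySem.List.max? d.keys (fun k => k) with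
  | none => []  -- max() raises in Python; excluded by Pre_
  | some mx =>
    if mx < 0 then []
    else
      let net_range := d.values.foldl (fun r points => points.foldl pvNetRangeStepB r) PySem.Dict.empty
      let buckets0 := (PySem.List.pyRange 0 (mx + 1) 1).foldl (fun dd x => dd.insert x ([] : List Int)) PySem.Dict.empty
      let buckets := net_range.items.foldl (fun bs nr =>
          (PySem.List.pyRange (max nr.2.1 0) (min nr.2.2 (mx + 1)) 1).foldl
            (fun bs x => bs.modify x [] (· ++ [nr.1])) bs) buckets0
      (buckets.items.foldl (fun dd p => dd.insert (p.1, p.1 + 1) p.2) PySem.Dict.empty).items.map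
        (fun p => (p.1.1, p.1.2, p.2))

-- ===== PRECONDITION & SPEC =====
-- Pre_ excludes only the empty dict, on which Python A raises ValueError (max() of an empty sequence).
def Pre_generate_interval_dict (x_coordinate_dict : List (Int × List (Int × List Int))) : Prop :=
  x_coordinate_dict ≠ []
instance (x_coordinate_dict : List (Int × List (Int × List Int))) : Decidable (Pre_generate_interval_dict x_coordinate_dict) := by unfold Pre_generate_interval_dict; infer_instance
def pvWitness_generate_interval_dict : (List (Int × List (Int × List Int))) := [(0, [])]
def Spec_generate_interval_dict (x_coordinate_dict : List (Int × List (Int × List Int))) (out : List (Int × Int × List Int)) : Prop := out = generate_interval_dict_alt x_coordinate_dict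
instance (x_coordinate_dict : List (Int × List (Int × List Int))) (out : List (Int × Int × List Int)) : Decidable (Spec_generate_interval_dict x_coordinate_dict out) := by unfold Spec_generate_interval_dict; infer_instance

-- ===== CLAIM (what is proved, stated in full; the proofs are below) =====
def Claim_equal_generate_interval_dict : Prop := ∀ (x_coordinate_dict : List (Int × List (Int × List Int))), Dom_generate_interval_dict x_coordinate_dict → Pre_generate_interval_dict x_coordinate_dict → Spec_generate_interval_dict x_coordinate_dict (generate_interval_dict x_coordinate_dict)

-- ===== LEMMAS AND PROOFS =====

-- nets spanning the interval k = (x, x_plus_1), in the order they occur in R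
def pvNetsFor (R : List (Int × Int × Int)) (k : Int × Int) : List Int :=
  (R.filter (fun nr => decide (nr.2.1 ≤ k.1 ∧ k.2 ≤ nr.2.2))).map (·.1)

theorem pvStepAB : pvNetRangeStepA = pvNetRangeStepB := by
  funext r pi
  unfold pvNetRangeStepA pvNetRangeStepB
  cases h2 : pi.2 with
  | nil => rfl
  | cons p t =>
    cases hg : r.get? pi.1 with
    | none => simp [PySem.Dict.getD_eq_get?_getD, hg]
    | some c => simp [PySem.Dict.getD_eq_get?_getD, hg]

theorem pvRangesEq (d : PySem.Dict Int (List (Int × List Int))) :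
    d.items.foldl (fun r kv => kv.2.foldl pvNetRangeStepA r) PySem.Dict.empty
      = d.values.foldl (fun r points => points.foldl pvNetRangeStepB r) PySem.Dict.empty := by
  rw [pvStepAB]
  simp only [PySem.Dict.values]
  rw [List.foldl_map]

-- A's inner loop over the nets, at a fixed interval key k
theorem pvInnerA_getD (R : List (Int × Int × Int)) (k : Int × Int)
    (dd : PySem.Dict (Int × Int) (List Int)) (k' : Int × Int) :
    (R.foldl (fun dd nr => if nr.2.1 ≤ k.1 ∧ k.2 ≤ nr.2.2 then dd.modify k [] (· ++ [nr.1]) else dd) dd).getD k' []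
      = if k' = k then dd.getD k [] ++ pvNetsFor R k
        else dd.getD k' [] := by
  induction R generalizing dd with
  | nil => by_cases hk : k' = k <;> simp [hk, pvNetsFor]
  | cons nr R ih =>
    simp only [List.foldl_cons]
    by_cases hc : nr.2.1 ≤ k.1 ∧ k.2 ≤ nr.2.2
    · rw [if_pos hc, ih]
      by_cases hk : k' = k
      · subst hk
        simp [pvNetsFor, hc, PySem.Dict.getD_modify_self]
      · simp [hk, PySem.Dict.getD_modify_of_ne _ _ _ hk]
    · rw [if_neg hc, ih]
      by_cases hk : k' = k <;> simp [hk, pvNetsFor, hc]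

theorem pvInnerA_keys (R : List (Int × Int × Int)) (k : Int × Int)
    (dd : PySem.Dict (Int × Int) (List Int)) (hk : k ∈ dd.keys) :
    (R.foldl (fun dd nr => if nr.2.1 ≤ k.1 ∧ k.2 ≤ nr.2.2 then dd.modify k [] (· ++ [nr.1]) else dd) dd).keys
      = dd.keys := by
  induction R generalizing dd with
  | nil => rfl
  | cons nr R ih =>
    simp only [List.foldl_cons]
    by_cases hc : nr.2.1 ≤ k.1 ∧ k.2 ≤ nr.2.2
    · rw [if_pos hc]
      have hkeys : (dd.modify k [] (· ++ [nr.1])).keys = dd.keys := by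
        rw [PySem.Dict.keys_modify,
          PySem.Dict.keys_insert_of_contains _ _ ((PySem.Dict.contains_iff_mem_keys dd k).mpr hk)]
      rw [ih _ (hkeys ▸ hk), hkeys]
    · rw [if_neg hc, ih _ hk]

-- A's outer loop over the intervals
theorem pvOuterA (R : List (Int × Int × Int)) (L : List ((Int × Int) × List Int))
    (dd : PySem.Dict (Int × Int) (List Int)) (hkeys : ∀ p ∈ L, p.1 ∈ dd.keys)
    (hnd : (L.map (·.1)).Nodup) :
    let F := L.foldl (fun dd kv =>
      R.foldl (fun dd nr => if nr.2.1 ≤ kv.1.1 ∧ kv.1.2 ≤ nr.2.2 then dd.modify kv.1 [] (· ++ [nr.1]) else dd) dd) dd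
    F.keys = dd.keys ∧ ∀ k, F.getD k [] =
      if k ∈ L.map (·.1) then dd.getD k [] ++ pvNetsFor R k else dd.getD k [] := by
  induction L generalizing dd with
  | nil => simp
  | cons kv L ih =>
    simp only [List.foldl_cons]
    have hmem : kv.1 ∈ dd.keys := hkeys kv (List.mem_cons_self ..)
    have hkeys' : (R.foldl (fun dd nr => if nr.2.1 ≤ kv.1.1 ∧ kv.1.2 ≤ nr.2.2 then dd.modify kv.1 [] (· ++ [nr.1]) else dd) dd).keys = dd.keys :=
      pvInnerA_keys R kv.1 dd hmem
    have hnd' : (L.map (·.1)).Nodup := (List.nodup_cons.mp hnd).2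
    have hnotin : kv.1 ∉ L.map (·.1) := (List.nodup_cons.mp hnd).1
    obtain ⟨ihk, ihg⟩ := ih _ (fun p hp => hkeys' ▸ hkeys p (List.mem_cons_of_mem _ hp)) hnd'
    refine ⟨by rw [ihk, hkeys'], fun k => ?_⟩
    rw [ihg k]
    by_cases hkkv : k = kv.1
    · subst hkkv
      simp [hnotin, pvInnerA_getD]
    · rw [pvInnerA_getD, if_neg hkkv]
      by_cases hkL : k ∈ L.map (·.1) <;> simp [hkL, hkkv]

-- B's inner loop: one net appended across its covered range
theorem pvInnerB_getD (xs : List Int) (hnd : xs.Nodup) (v : Int)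
    (bs : PySem.Dict Int (List Int)) (y : Int) :
    (xs.foldl (fun bs x => bs.modify x [] (· ++ [v])) bs).getD y []
      = bs.getD y [] ++ (if y ∈ xs then [v] else []) := by
  induction xs generalizing bs with
  | nil => simp
  | cons x xs ih =>
    simp only [List.foldl_cons]
    rw [ih (List.nodup_cons.mp hnd).2]
    by_cases hy : y = x
    · subst hy
      have hnot : y ∉ xs := (List.nodup_cons.mp hnd).1
      simp [hnot, PySem.Dict.getD_modify_self]
    · rw [PySem.Dict.getD_modify_of_ne _ _ _ hy]
      simp [hy]

theorem pvInnerB_keys (xs : List Int) (v : Int) (bs : PySem.Dict Int (List Int))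
    (h : ∀ x ∈ xs, x ∈ bs.keys) :
    (xs.foldl (fun bs x => bs.modify x [] (· ++ [v])) bs).keys = bs.keys := by
  induction xs generalizing bs with
  | nil => rfl
  | cons x xs ih =>
    simp only [List.foldl_cons]
    have hkeys : (bs.modify x [] (· ++ [v])).keys = bs.keys := by
      rw [PySem.Dict.keys_modify,
        PySem.Dict.keys_insert_of_contains _ _
          ((PySem.Dict.contains_iff_mem_keys bs x).mpr (h x (List.mem_cons_self ..)))]
    rw [ih _ (fun z hz => hkeys ▸ h z (List.mem_cons_of_mem _ hz)), hkeys]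

-- B's outer loop over the nets
theorem pvOuterB (mx : Int) (R : List (Int × Int × Int)) (bs : PySem.Dict Int (List Int))
    (hK : ∀ x : Int, 0 ≤ x → x < mx + 1 → x ∈ bs.keys) :
    let F := R.foldl (fun bs nr =>
      (PySem.List.pyRange (max nr.2.1 0) (min nr.2.2 (mx + 1)) 1).foldl
        (fun bs x => bs.modify x [] (· ++ [nr.1])) bs) bs
    F.keys = bs.keys ∧ ∀ y, F.getD y [] =
      bs.getD y [] ++ (R.filter (fun nr => decide (max nr.2.1 0 ≤ y ∧ y < min nr.2.2 (mx + 1)))).map (·.1) := by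
  induction R generalizing bs with
  | nil => simp
  | cons nr R ih =>
    simp only [List.foldl_cons]
    have hsub : ∀ x ∈ PySem.List.pyRange (max nr.2.1 0) (min nr.2.2 (mx + 1)) 1, x ∈ bs.keys := by
      intro x hx
      have hb := PySem.List.mem_pyRange_one.mp hx
      exact hK x (le_trans (le_max_right _ _) hb.1) (lt_of_lt_of_le hb.2 (min_le_right _ _))
    have hkeys := pvInnerB_keys _ nr.1 bs hsub
    obtain ⟨ihk, ihg⟩ := ih _ (fun x h0 h1 => hkeys ▸ hK x h0 h1)
    refine ⟨by rw [ihk, hkeys], fun y => ?_⟩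
    rw [ihg y, pvInnerB_getD _ (PySem.List.nodup_pyRange_one _ _) _ _ y, List.filter_cons]
    by_cases hc : max nr.2.1 0 ≤ y ∧ y < min nr.2.2 (mx + 1)
    · rw [if_pos (PySem.List.mem_pyRange_one.mpr hc), if_pos (by simp [hc])]
      simp
    · rw [if_neg (fun h => hc (PySem.List.mem_pyRange_one.mp h)), if_neg (by simp at hc ⊢; omega)]
      simp

-- closed form of A's whole interval phase
theorem pvSideA (mx : Int) (N : List (Int × Int × Int)) :
    ((((PySem.List.pyRange 0 (mx + 1) 1).foldl (fun dd x => dd.insert (x, x + 1) ([] : List Int)) PySem.Dict.empty).items.foldl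
        (fun dd kv => N.foldl (fun dd nr => if nr.2.1 ≤ kv.1.1 ∧ kv.1.2 ≤ nr.2.2 then dd.modify kv.1 [] (· ++ [nr.1]) else dd) dd)
        ((PySem.List.pyRange 0 (mx + 1) 1).foldl (fun dd x => dd.insert (x, x + 1) ([] : List Int)) PySem.Dict.empty)).items.map
      (fun p => (p.1.1, p.1.2, p.2)))
    = (PySem.List.pyRange 0 (mx + 1) 1).map (fun x => (x, x + 1, pvNetsFor N (x, x + 1))) := by
  set K := PySem.List.pyRange 0 (mx + 1) 1 with hK
  set I := K.foldl (fun dd x => dd.insert (x, x + 1) ([] : List Int)) PySem.Dict.empty with hI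
  have hKnodup : K.Nodup := PySem.List.nodup_pyRange_one 0 (mx + 1)
  have hinj : Function.Injective (fun x : Int => (x, x + 1)) := by
    intro a b h; simpa using congrArg Prod.fst h
  have hKnd : (K.map (fun x => (x, x + 1))).Nodup := hKnodup.map hinj
  have hIitems : I.items = K.map (fun x => ((x, x + 1), ([] : List Int))) := by
    rw [hI]
    have := PySem.Dict.items_foldl_insert_fresh K (fun x => (x, x + 1)) (fun _ => ([] : List Int))
      PySem.Dict.empty (fun a _ => by simp) hKnd
    simpa using this
  have hIkeys : I.keys = K.map (fun x => (x, x + 1)) := by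
    simp only [PySem.Dict.keys, hIitems, List.map_map]; rfl
  have hInd : I.keys.Nodup := by rw [hIkeys]; exact hKnd
  obtain ⟨hFkeys, hFget⟩ := pvOuterA N I.items I (fun p hp => PySem.Dict.mem_keys_of_mem_items I hp)
    (by simpa only [PySem.Dict.keys] using hInd)
  set F := I.items.foldl (fun dd kv => N.foldl
    (fun dd nr => if nr.2.1 ≤ kv.1.1 ∧ kv.1.2 ≤ nr.2.2 then dd.modify kv.1 [] (· ++ [nr.1]) else dd) dd) I with hF
  have hFnd : F.keys.Nodup := by rw [hFkeys]; exact hInd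
  have hFitems : F.items = F.keys.map (fun k => (k, F.getD k [])) := PySem.Dict.items_eq_map_keys F hFnd []
  rw [hFitems, hFkeys, hIkeys, List.map_map, List.map_map]
  refine List.map_congr_left (fun x hx => ?_)
  have hmemI : ((x, x + 1), ([] : List Int)) ∈ I.items := by
    rw [hIitems]; exact List.mem_map.mpr ⟨x, hx, rfl⟩
  have hkmem : (x, x + 1) ∈ I.items.map (·.1) := by
    rw [hIitems, List.map_map]; exact List.mem_map.mpr ⟨x, hx, rfl⟩
  have hgd : F.getD (x, x + 1) [] = pvNetsFor N (x, x + 1) := by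
    rw [hFget (x, x + 1), if_pos hkmem, PySem.Dict.getD_of_mem_items I hmemI hInd]
    simp
  simp [hgd]

-- closed form of B's whole bucket phase
theorem pvSideB (mx : Int) (N : List (Int × Int × Int)) :
    ((N.foldl (fun bs nr => (PySem.List.pyRange (max nr.2.1 0) (min nr.2.2 (mx + 1)) 1).foldl
          (fun bs x => bs.modify x [] (· ++ [nr.1])) bs)
        ((PySem.List.pyRange 0 (mx + 1) 1).foldl (fun dd x => dd.insert x ([] : List Int)) PySem.Dict.empty)).items.foldl
        (fun dd p => dd.insert (p.1, p.1 + 1) p.2) PySem.Dict.empty).items.map (fun p => (p.1.1, p.1.2, p.2))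
    = (PySem.List.pyRange 0 (mx + 1) 1).map (fun x => (x, x + 1, pvNetsFor N (x, x + 1))) := by
  set K := PySem.List.pyRange 0 (mx + 1) 1 with hK
  set B0 := K.foldl (fun dd x => dd.insert x ([] : List Int)) PySem.Dict.empty with hB0
  have hKnodup : K.Nodup := PySem.List.nodup_pyRange_one 0 (mx + 1)
  have hB0items : B0.items = K.map (fun x => (x, ([] : List Int))) := by
    rw [hB0]
    have := PySem.Dict.items_foldl_insert_fresh K (fun a => a) (fun _ => ([] : List Int))
      PySem.Dict.empty (fun a _ => by simp) (by simpa using hKnodup)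
    simpa using this
  have hB0keys : B0.keys = K := by
    simp only [PySem.Dict.keys, hB0items, List.map_map]
    have hall : ((fun p : Int × List Int => p.1) ∘ fun x : Int => (x, ([] : List Int))) = id := rfl
    rw [hall, List.map_id]
  obtain ⟨hBkeys, hBget⟩ := pvOuterB mx N B0 (fun x h0 h1 => by
    rw [hB0keys, hK]; exact PySem.List.mem_pyRange_one.mpr ⟨h0, h1⟩)
  set Bk := N.foldl (fun bs nr => (PySem.List.pyRange (max nr.2.1 0) (min nr.2.2 (mx + 1)) 1).foldl
    (fun bs x => bs.modify x [] (· ++ [nr.1])) bs) B0 with hBk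
  have hBknd : Bk.keys.Nodup := by rw [hBkeys, hB0keys]; exact hKnodup
  have hBkitems : Bk.items = K.map (fun y => (y, Bk.getD y [])) := by
    rw [(PySem.Dict.items_eq_map_keys Bk hBknd [] : _), hBkeys, hB0keys]
  have hnd2 : (Bk.items.map (fun p => (p.1, p.1 + 1))).Nodup := by
    rw [hBkitems, List.map_map]
    exact hKnodup.map (by intro a b h; simpa using congrArg Prod.fst h)
  have hfinal := PySem.Dict.items_foldl_insert_fresh Bk.items (fun p => (p.1, p.1 + 1)) (fun p => p.2)
    PySem.Dict.empty (fun a _ => by simp) hnd2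
  rw [hfinal]
  simp only [show (PySem.Dict.empty : PySem.Dict (Int × Int) (List Int)).items = [] from rfl,
    List.nil_append, List.map_map]
  rw [hBkitems, List.map_map]
  refine List.map_congr_left (fun y hy => ?_)
  have hb := PySem.List.mem_pyRange_one.mp (hK ▸ hy)
  have hmem0 : (y, ([] : List Int)) ∈ B0.items := by
    rw [hB0items]; exact List.mem_map.mpr ⟨y, hy, rfl⟩
  have hnd0 : B0.keys.Nodup := by rw [hB0keys]; exact hKnodup
  have hgd : Bk.getD y [] = pvNetsFor N (y, y + 1) := by
    rw [hBget y, PySem.Dict.getD_of_mem_items B0 hmem0 hnd0]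
    simp only [List.nil_append, pvNetsFor]
    congr 1
    refine List.filter_congr (fun nr _ => ?_)
    simp only [decide_eq_decide, max_le_iff, lt_min_iff]
    omega
  simp [hgd]

-- ===== VERDICT (by name: the statement is the Claim_ definition above) =====
theorem generate_interval_dict_spec : Claim_equal_generate_interval_dict := by
  intro xs hdom hpre
  unfold Spec_generate_interval_dict generate_interval_dict generate_interval_dict_alt
  dsimp only
  cases hmax : PySem.List.max? (PySem.Dict.ofList xs).keys (fun k => k) with
  | none => rfl
  | some mx =>
    dsimp only
    by_cases hm : mx < 0
    · rw [PySem.List.pyRange_one_eq_nil (show mx + 1 ≤ (0:Int) by omega)]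
      simp [hm]
    · have hne : PySem.List.pyRange 0 (mx + 1) 1 ≠ [] := by
        rw [PySem.List.pyRange_one_cons (by omega : (0:Int) < mx + 1)]
        exact List.cons_ne_nil _ _
      rw [if_neg hne, if_neg hm, pvSideA mx, pvSideB mx, pvRangesEq]
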